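-- pv_equiv track=rewrite | github.com/h8man13/h8man-finance | services/telegram_router/app/core/templates.py | escape_mdv2_preserving_code
-- ===== SOURCE A (Python) =====
-- MDV2_ESCAPE_CHARS = set("_*[]()~`>#+-=|{}!.")
--
-- def escape_mdv2_preserving_code(s: str) -> str:
--     """Escape per MDV2, but preserve inline code spans delimited by single backticks.
--     Inside code spans, only escape backslash (\\) per spec.
--     """
--     out = []
--     in_code = False
--     for ch in s:
--         if ch == "`":
--             out.append("`")
--             in_code = not in_code
--             continue
--         if in_code:
--             if ch == "\\":
--                 out.append("\\\\")
--             else: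
--                 out.append(ch)
--         else:
--             if ch in MDV2_ESCAPE_CHARS:
--                 out.append("\\" + ch)
--             else:
--                 out.append(ch)
--     return "".join(out)
-- ===== SOURCE B (Python) =====
-- MDV2_ESCAPE_CHARS = set("_*[]()~`>#+-=|{}!.")
--
-- def escape_mdv2_preserving_code(s: str) -> str:
--     """Split on backticks; even segments get full MDV2 escaping, odd (code) segments
--     only have backslashes doubled; rejoin with backticks."""
--     parts = []
--     for i, seg in enumerate(s.split('`')):
--         if i % 2 == 0:
--             parts.append(''.join('\\' + c if c in MDV2_ESCAPE_CHARS else c for c in seg))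
--         else:
--             parts.append(''.join('\\\\' if c == '\\' else c for c in seg))
--     return '`'.join(parts)
-- ===== Notes on version B (the rewrite author's own statement) =====
-- stated objective: simpler
-- what changed: Replaces A's single stateful pass with an in_code toggle by splitting the string on backticks and processing segments by index parity (even: full MDV2 escaping, odd: backslash doubling), rejoined with backticks.
import Mathlib
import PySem

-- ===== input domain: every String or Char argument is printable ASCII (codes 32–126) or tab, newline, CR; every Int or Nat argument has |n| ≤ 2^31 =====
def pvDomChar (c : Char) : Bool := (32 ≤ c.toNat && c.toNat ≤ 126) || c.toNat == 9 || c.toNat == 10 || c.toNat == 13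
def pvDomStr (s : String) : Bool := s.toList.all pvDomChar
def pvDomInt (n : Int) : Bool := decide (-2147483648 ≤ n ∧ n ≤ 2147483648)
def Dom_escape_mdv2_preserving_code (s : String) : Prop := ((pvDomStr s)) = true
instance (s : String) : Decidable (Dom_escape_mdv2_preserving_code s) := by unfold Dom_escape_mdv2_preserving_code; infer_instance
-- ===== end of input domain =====

-- B replaces A's stateful in_code toggle by a split-on-backtick pass: even segments get
-- full MDV2 escaping, odd (code) segments only double backslashes; objective: simpler.

-- ===== PORT A =====
-- MDV2_ESCAPE_CHARS = set("_*[]()~`>#+-=|{}!.")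
def mdv2EscapeChars : List Char := "_*[]()~`>#+-=|{}!.".toList

-- one iteration of A's for-loop; state = (out as chars, in_code)
def escAStep (st : List Char × Bool) (ch : Char) : List Char × Bool :=
  if ch = '`' then (st.1 ++ ['`'], !st.2)
  else if st.2 then
    if ch = '\\' then (st.1 ++ ['\\', '\\'], st.2) else (st.1 ++ [ch], st.2)
  else if ch ∈ mdv2EscapeChars then (st.1 ++ ['\\', ch], st.2)
  else (st.1 ++ [ch], st.2)

def escape_mdv2_preserving_code (s : String) : String :=
  String.ofList (s.toList.foldl escAStep ([], false)).1

-- ===== PORT B =====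
-- '\\' + c if c in MDV2_ESCAPE_CHARS else c   (per char, even segments)
def escTextChar (c : Char) : List Char := if c ∈ mdv2EscapeChars then ['\\', c] else [c]
-- '\\\\' if c == '\\' else c   (per char, odd = code segments)
def escCodeChar (c : Char) : List Char := if c = '\\' then ['\\', '\\'] else [c]
-- body of B's loop for index i: the processed segment
def escSegment (i : Int) (seg : List Char) : List Char :=
  if PySem.Int.mod i 2 = 0 then seg.flatMap escTextChar else seg.flatMap escCodeChar

def escape_mdv2_preserving_code_alt (s : String) : String :=
  String.ofList (List.intercalate ['`']
    ((PySem.List.enumerate (s.toList.splitOn '`')).map fun p => escSegment p.1 p.2))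

-- ===== PRECONDITION & SPEC =====
def Spec_escape_mdv2_preserving_code (s : String) (out : String) : Prop := out = escape_mdv2_preserving_code_alt s
instance (s : String) (out : String) : Decidable (Spec_escape_mdv2_preserving_code s out) := by unfold Spec_escape_mdv2_preserving_code; infer_instance

-- ===== CLAIM (what is proved, stated in full; the proofs are below) =====
def Claim_equal_escape_mdv2_preserving_code : Prop := ∀ (s : String), Dom_escape_mdv2_preserving_code s → Spec_escape_mdv2_preserving_code s (escape_mdv2_preserving_code s)

-- ===== LEMMAS AND PROOFS =====

-- what A emits for one non-backtick character, given the in_code flag b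
def emitA (b : Bool) (c : Char) : List Char :=
  if b then escCodeChar c else escTextChar c

-- A's loop as a pure recursion (no accumulator)
def gA (b : Bool) : List Char → List Char
  | [] => []
  | c :: t => if c = '`' then '`' :: gA (!b) t else emitA b c ++ gA b t

lemma foldl_escAStep (cs : List Char) : ∀ (acc : List Char) (b : Bool),
    (cs.foldl escAStep (acc, b)).1 = acc ++ gA b cs := by
  induction cs with
  | nil => intro acc b; simp [gA]
  | cons c t ih =>
    intro acc b
    by_cases hc : c = '`'
    · subst hc
      simp [List.foldl_cons, escAStep, gA, ih]
    · by_cases hb : b = true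
      · subst hb
        by_cases hbs : c = '\\' <;>
          simp [List.foldl_cons, escAStep, gA, emitA, escCodeChar, hc, hbs, ih]
      · replace hb : b = false := by cases b <;> simp_all
        subst hb
        by_cases hm : c ∈ mdv2EscapeChars <;>
          simp [List.foldl_cons, escAStep, gA, emitA, escTextChar, hc, hm, ih]

-- B's processing of one segment, given the in_code flag
def procB (b : Bool) (seg : List Char) : List Char :=
  if b then seg.flatMap escCodeChar else seg.flatMap escTextChar

-- B's join over segments, with alternating flag
def joinPar (b : Bool) : List (List Char) → List Char
  | [] => []
  | seg :: rest => procB b seg ++ if rest = [] then [] else '`' :: joinPar (!b) rest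

lemma procB_cons (b : Bool) (c : Char) (seg : List Char) :
    procB b (c :: seg) = emitA b c ++ procB b seg := by
  cases b <;> simp [procB, emitA]

lemma gA_eq_joinPar (cs : List Char) : ∀ (b : Bool),
    gA b cs = joinPar b (cs.splitOn '`') := by
  induction cs with
  | nil => intro b; simp [gA, List.splitOn, List.splitOnP_nil, joinPar, procB]
  | cons c t ih =>
    intro b
    by_cases hc : c = '`'
    · subst hc
      have hne := List.splitOnP_ne_nil (fun x => x == '`') t
      rw [gA, List.splitOn, List.splitOnP_cons]
      simp only [BEq.rfl, if_true, joinPar, procB]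
      cases b <;> simp [hne, ih, List.splitOn]
    · have hne := List.splitOnP_ne_nil (fun x => x == '`') t
      rw [gA, List.splitOn, List.splitOnP_cons]
      obtain ⟨s0, rest, hsr⟩ : ∃ s0 rest, t.splitOnP (fun x => x == '`') = s0 :: rest := by
        cases h : t.splitOnP (fun x => x == '`') with
        | nil => exact absurd h hne
        | cons a l => exact ⟨a, l, rfl⟩
      have hcb : (c == '`') = false := by simp [hc]
      rw [if_neg hc, hcb]
      simp only [Bool.false_eq_true, if_false, hsr, List.modifyHead]
      rw [joinPar, procB_cons, ih b, List.splitOn, hsr, joinPar]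
      simp [List.append_assoc]

-- parity of enumerate indices: PySem.Int.mod (n) 2 alternates
lemma mod2_next (n : Int) : (PySem.Int.mod (n + 1) 2 = 0) ↔ ¬ (PySem.Int.mod n 2 = 0) := by
  have h1 : PySem.Int.mod (n + 1) 2 = (n + 1) % 2 := PySem.Int.mod_eq_emod_of_pos (by norm_num)
  have h2 : PySem.Int.mod n 2 = n % 2 := PySem.Int.mod_eq_emod_of_pos (by norm_num)
  rw [h1, h2]; omega

lemma intercalate_cons₂ (sep x y : List Char) (zs : List (List Char)) :
    List.intercalate sep (x :: y :: zs) = x ++ sep ++ List.intercalate sep (y :: zs) := by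
  simp [List.intercalate, List.intersperse]

lemma intercalate_enumerate (segs : List (List Char)) : ∀ (n : Int),
    List.intercalate ['`'] ((PySem.List.enumerate segs n).map fun p => escSegment p.1 p.2)
      = joinPar (!decide (PySem.Int.mod n 2 = 0)) segs := by
  induction segs with
  | nil => intro n; simp [PySem.List.enumerate, joinPar, List.intercalate]
  | cons seg rest ih =>
    intro n
    have hm : PySem.Int.mod n 2 = n % 2 := PySem.Int.mod_eq_emod_of_pos (by norm_num)
    have hseg : escSegment n seg = procB (!decide (PySem.Int.mod n 2 = 0)) seg := by
      rw [escSegment, hm]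
      by_cases h : n % 2 = 0 <;> simp [procB, h]
    cases rest with
    | nil =>
      simp [PySem.List.enumerate, List.intercalate, joinPar, hseg]
    | cons seg2 rest2 =>
      have hb : (!decide (PySem.Int.mod (n + 1) 2 = 0)) = !(!decide (PySem.Int.mod n 2 = 0)) := by
        have hiff := mod2_next n
        by_cases h : PySem.Int.mod n 2 = 0 <;> simp_all
      have key := ih (n + 1)
      rw [PySem.List.enumerate, List.map_cons] at key
      rw [PySem.List.enumerate, List.map_cons, PySem.List.enumerate, List.map_cons,
          intercalate_cons₂, key, hb]
      simp only at hseg ⊢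
      rw [hseg]
      conv_rhs => rw [joinPar, joinPar]
      simp
      rw [joinPar]

-- ===== VERDICT (by name: the statement is the Claim_ definition above) =====
theorem escape_mdv2_preserving_code_spec : Claim_equal_escape_mdv2_preserving_code := by
  intro s _
  unfold Spec_escape_mdv2_preserving_code escape_mdv2_preserving_code escape_mdv2_preserving_code_alt
  rw [foldl_escAStep, gA_eq_joinPar, intercalate_enumerate]
  norm_num [PySem.Int.mod]
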